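-- pv_equiv track=rewrite | github.com/ItamarRocha/DailyByte | week_13/day88_characterscramble.py | character_scramble
-- ===== SOURCE A (Python) =====
-- def character_scramble(passage, text):
--     char_count = {}
--     for el in text:
--         if el not in char_count:
--             char_count[el] = 1
--         else:
--             char_count[el] += 1
--
--     for el in passage:
--         if el not in char_count or char_count[el] - 1 < 0:
--             return False
--         char_count[el] -= 1
--
--     return True
-- ===== SOURCE B (Python) =====
-- def character_scramble(passage, text):
--     p = sorted(passage)
--     t = sorted(text)
--     i = 0
--     j = 0
--     while i < len(p):
--         if j == len(t):
--             return False
--         if t[j] < p[i]: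
--             j += 1
--         elif t[j] == p[i]:
--             i += 1
--             j += 1
--         else:
--             return False
--     return True
-- ===== Notes on version B (the rewrite author's own statement) =====
-- stated objective: alternative
-- what changed: Replaced A's frequency-dictionary count-then-decrement algorithm by a counting-free sort-then-merge: sort both strings and sweep them with two pointers, failing when a passage character cannot be matched in the sorted text.
import Mathlib
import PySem

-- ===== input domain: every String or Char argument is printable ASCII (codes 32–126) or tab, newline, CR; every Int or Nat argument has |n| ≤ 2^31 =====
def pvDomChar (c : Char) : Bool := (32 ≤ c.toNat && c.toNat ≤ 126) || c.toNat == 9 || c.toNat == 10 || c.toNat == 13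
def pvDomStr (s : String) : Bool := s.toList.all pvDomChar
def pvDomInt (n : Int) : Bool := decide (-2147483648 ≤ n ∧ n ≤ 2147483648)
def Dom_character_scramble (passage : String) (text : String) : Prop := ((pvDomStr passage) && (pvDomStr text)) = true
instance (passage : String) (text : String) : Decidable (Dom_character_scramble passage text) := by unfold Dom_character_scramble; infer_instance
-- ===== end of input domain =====

-- B replaces A's frequency-dictionary count-then-decrement algorithm by a counting-free sort-then-two-pointer merge sweep (objective: alternative).


-- ===== PORT A =====
-- the 'for el in passage' loop with its early 'return False'
def pvLoopA : List Char → PySem.Dict Char Int → Bool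
  | [], _ => true
  | el :: rest, d =>
      if ¬ (d.contains el = true) ∨ d.getD el 0 - 1 < 0 then false
      else pvLoopA rest (d.insert el (d.getD el 0 - 1))

def character_scramble (passage : String) (text : String) : Bool :=
  let char_count : PySem.Dict Char Int :=
    text.toList.foldl (fun d el =>
      if ¬ (d.contains el = true) then d.insert el 1
      else d.insert el (d.getD el 0 + 1)) PySem.Dict.empty
  pvLoopA passage.toList char_count

-- ===== PORT B =====
-- the 'while i < len(p)' two-pointer sweep over the two sorted lists, with its early 'return False's
def pvMerge : List Char → List Char → Bool
  | [], _ => true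
  | _ :: _, [] => false
  | a :: p, b :: t =>
      if b < a then pvMerge (a :: p) t
      else if b = a then pvMerge p t
      else false
termination_by p t => p.length + t.length

def character_scramble_alt (passage : String) (text : String) : Bool :=
  pvMerge (PySem.List.sorted passage.toList (fun c => c) false)
          (PySem.List.sorted text.toList (fun c => c) false)

-- ===== PRECONDITION & SPEC =====
def Spec_character_scramble (passage : String) (text : String) (out : Bool) : Prop := out = character_scramble_alt passage text
instance (passage : String) (text : String) (out : Bool) : Decidable (Spec_character_scramble passage text out) := by unfold Spec_character_scramble; infer_instance

-- ===== CLAIM (what is proved, stated in full; the proofs are below) =====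
def Claim_equal_character_scramble : Prop := ∀ (passage : String) (text : String), Dom_character_scramble passage text → Spec_character_scramble passage text (character_scramble passage text)

-- ===== LEMMAS AND PROOFS =====

-- In any dict, a missing key reads as 0, so A's combined failure test 'el not in d or d[el]-1 < 0'
-- is exactly 'd.getD el 0 ≤ 0'.
theorem pvFail_iff (d : PySem.Dict Char Int) (el : Char) :
    (¬ (d.contains el = true) ∨ d.getD el 0 - 1 < 0) ↔ d.getD el 0 ≤ 0 := by
  constructor
  · rintro (h | h)
    · have hf : d.contains el = false := by
        cases hh : d.contains el with
        | false => rfl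
        | true => exact absurd hh h
      rw [PySem.Dict.getD_of_not_contains d 0 hf]
    · omega
  · intro h
    exact Or.inr (by omega)

-- A's decrement loop succeeds iff every char's multiplicity in p is covered by the dict's count.
theorem pvLoopA_eq (p : List Char) (d : PySem.Dict Char Int) :
    pvLoopA p d = decide (∀ c ∈ p, (p.count c : Int) ≤ d.getD c 0) := by
  induction p generalizing d with
  | nil => simp [pvLoopA]
  | cons el rest ih =>
    by_cases hle : d.getD el 0 ≤ 0
    · have hfail : ¬ (∀ c ∈ el :: rest, ((el :: rest).count c : Int) ≤ d.getD c 0) := by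
        intro h
        have hcnt : 1 ≤ ((el :: rest).count el : Int) := by
          exact_mod_cast List.count_pos_iff.mpr List.mem_cons_self
        have := h el List.mem_cons_self
        omega
      rw [show pvLoopA (el :: rest) d
            = if ¬ (d.contains el = true) ∨ d.getD el 0 - 1 < 0 then false
              else pvLoopA rest (d.insert el (d.getD el 0 - 1)) from rfl,
          if_pos ((pvFail_iff d el).mpr hle), decide_eq_false hfail]
    · rw [not_le] at hle
      have hstep : pvLoopA (el :: rest) d
          = pvLoopA rest (d.insert el (d.getD el 0 - 1)) := by
        rw [show pvLoopA (el :: rest) d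
              = if ¬ (d.contains el = true) ∨ d.getD el 0 - 1 < 0 then false
                else pvLoopA rest (d.insert el (d.getD el 0 - 1)) from rfl,
            if_neg]
        rw [pvFail_iff]
        omega
      rw [hstep, ih, decide_eq_decide]
      constructor
      · intro h c hc
        by_cases hce : c = el
        · subst hce
          by_cases hcr : c ∈ rest
          · have := h c hcr
            rw [PySem.Dict.getD_insert, if_pos rfl] at this
            have hcc : (c :: rest).count c = rest.count c + 1 := by
              simp
            rw [hcc]; push_cast; omega
          · have hz : rest.count c = 0 := List.count_eq_zero.mpr hcr
            have hcc : (c :: rest).count c = 1 := by simp [hz]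
            rw [hcc]; omega
        · have hcr : c ∈ rest := by
            rcases List.mem_cons.mp hc with h1 | h1
            · exact absurd h1 hce
            · exact h1
          have := h c hcr
          rw [PySem.Dict.getD_insert, if_neg hce] at this
          have hcc : (el :: rest).count c = rest.count c := by
            simp [Ne.symm hce]
          rw [hcc]; exact this
      · intro h c hc
        rw [PySem.Dict.getD_insert]
        by_cases hce : c = el
        · subst hce
          rw [if_pos rfl]
          have := h c List.mem_cons_self
          have hcc : (c :: rest).count c = rest.count c + 1 := by
            simp
          rw [hcc] at this; push_cast at this; omega
        · rw [if_neg hce]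
          have := h c (List.mem_cons_of_mem _ hc)
          have hcc : (el :: rest).count c = rest.count c := by
            simp [Ne.symm hce]
          rw [hcc] at this; exact this

-- B's merge sweep over two ≤-sorted lists succeeds iff every char's multiplicity in p is covered by t.
theorem pvMerge_eq (t : List Char) (p : List Char)
    (hp : p.Pairwise (· ≤ ·)) (ht : t.Pairwise (· ≤ ·)) :
    pvMerge p t = decide (∀ c ∈ p, p.count c ≤ t.count c) := by
  induction t generalizing p with
  | nil =>
    cases p with
    | nil => simp [pvMerge]
    | cons a p' =>
      have hfail : ¬ (∀ c ∈ a :: p', (a :: p').count c ≤ ([] : List Char).count c) := by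
        intro h
        have h1 := h a List.mem_cons_self
        have hpos : 0 < (a :: p').count a := List.count_pos_iff.mpr List.mem_cons_self
        simp only [List.count_nil, Nat.le_zero] at h1
        omega
      rw [show pvMerge (a :: p') [] = false from by simp [pvMerge], decide_eq_false hfail]
  | cons b t' ih =>
    cases p with
    | nil => simp [pvMerge]
    | cons a p' =>
      have hpa : ∀ c ∈ a :: p', a ≤ c := by
        intro c hc
        rcases List.mem_cons.mp hc with h1 | h1
        · subst h1; exact le_refl _
        · exact (List.pairwise_cons.mp hp).1 c h1
      have htb : ∀ c ∈ b :: t', b ≤ c := by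
        intro c hc
        rcases List.mem_cons.mp hc with h1 | h1
        · subst h1; exact le_refl _
        · exact (List.pairwise_cons.mp ht).1 c h1
      by_cases hba : b < a
      · rw [show pvMerge (a :: p') (b :: t') = pvMerge (a :: p') t' from by
            simp [pvMerge, hba],
          ih (a :: p') hp (List.pairwise_cons.mp ht).2, decide_eq_decide]
        constructor
        · intro h c hc
          have h1 := h c hc
          have h2 : t'.count c ≤ (b :: t').count c := by
            by_cases hcb : c = b
            · subst hcb; simp
            · simp [Ne.symm hcb]
          omega
        · intro h c hc
          have h1 := h c hc
          have hcb : c ≠ b := by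
            have hac := hpa c hc
            intro hh; subst hh; exact absurd hac (not_le.mpr hba)
          have h2 : (b :: t').count c = t'.count c := by simp [Ne.symm hcb]
          omega
      · by_cases heq : b = a
        · subst heq
          rw [show pvMerge (b :: p') (b :: t') = pvMerge p' t' from by
              simp [pvMerge],
            ih p' (List.pairwise_cons.mp hp).2 (List.pairwise_cons.mp ht).2,
            decide_eq_decide]
          constructor
          · intro h c hc
            by_cases hcb : c = b
            · subst hcb
              have hc1 : (c :: p').count c = p'.count c + 1 := by simp
              have hc2 : (c :: t').count c = t'.count c + 1 := by simp
              by_cases hcp : c ∈ p'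
              · have := h c hcp
                omega
              · have : p'.count c = 0 := List.count_eq_zero.mpr hcp
                omega
            · have hcp : c ∈ p' := by
                rcases List.mem_cons.mp hc with h1 | h1
                · exact absurd h1 hcb
                · exact h1
              have := h c hcp
              have hc1 : (b :: p').count c = p'.count c := by simp [Ne.symm hcb]
              have hc2 : (b :: t').count c = t'.count c := by simp [Ne.symm hcb]
              omega
          · intro h c hc
            have := h c (List.mem_cons_of_mem _ hc)
            by_cases hcb : c = b
            · subst hcb
              have hc1 : (c :: p').count c = p'.count c + 1 := by simp
              have hc2 : (c :: t').count c = t'.count c + 1 := by simp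
              omega
            · have hc1 : (b :: p').count c = p'.count c := by simp [Ne.symm hcb]
              have hc2 : (b :: t').count c = t'.count c := by simp [Ne.symm hcb]
              omega
        · -- a < b: fail, and indeed a cannot be found in b :: t'
          have hfail : ¬ (∀ c ∈ a :: p', (a :: p').count c ≤ (b :: t').count c) := by
            intro h
            have hanot : a ∉ b :: t' := by
              intro hmem
              have := htb a hmem
              rcases lt_or_eq_of_le this with h1 | h1
              · exact hba h1
              · exact heq h1
            have hz : (b :: t').count a = 0 := List.count_eq_zero.mpr hanot
            have hpos : 0 < (a :: p').count a := List.count_pos_iff.mpr List.mem_cons_self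
            have := h a List.mem_cons_self
            omega
          rw [show pvMerge (a :: p') (b :: t') = false from by simp [pvMerge, hba, heq],
            decide_eq_false hfail]

-- A's text-counting loop body equals the standard counter body (the 'not in' branch inserts the same value).
theorem pvCountFun_eq :
    (fun (d : PySem.Dict Char Int) el =>
      if ¬ (d.contains el = true) then d.insert el 1
      else d.insert el (d.getD el 0 + 1))
    = (fun (d : PySem.Dict Char Int) el => d.insert el (d.getD el 0 + 1)) := by
  funext d el
  by_cases h : d.contains el = true
  · simp [h]
  · have hf : d.contains el = false := by
      cases hh : d.contains el with
      | false => rfl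
      | true => exact absurd hh h
    rw [if_pos h, PySem.Dict.getD_of_not_contains d 0 hf]
    norm_num

-- ===== VERDICT (by name: the statement is the Claim_ definition above) =====
theorem character_scramble_spec : Claim_equal_character_scramble := by
  intro passage text _
  unfold Spec_character_scramble character_scramble character_scramble_alt
  simp only [pvCountFun_eq, PySem.Dict.foldl_insert_getD_add_one_eq_counter]
  have hpp : (PySem.List.sorted passage.toList (fun c => c) false).Perm passage.toList :=
    PySem.List.sorted_perm _ _ _
  have htp : (PySem.List.sorted text.toList (fun c => c) false).Perm text.toList :=
    PySem.List.sorted_perm _ _ _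
  rw [pvLoopA_eq,
      pvMerge_eq _ _ (PySem.List.sorted_pairwise passage.toList (fun c => c))
        (PySem.List.sorted_pairwise text.toList (fun c => c)),
      decide_eq_decide]
  constructor
  · intro h c hc
    have hc' : c ∈ passage.toList := hpp.mem_iff.mp hc
    have := h c hc'
    rw [PySem.Dict.getD_counter] at this
    rw [hpp.count_eq, htp.count_eq]
    exact_mod_cast this
  · intro h c hc
    have := h c (hpp.mem_iff.mpr hc)
    rw [hpp.count_eq, htp.count_eq] at this
    rw [PySem.Dict.getD_counter]
    exact_mod_cast this
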